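-- pv_equiv track=rewrite | github.com/AdamZhouSE/pythonHomework | Code/CodeRecords/2370/60601/254038.py | baseNeg2
-- ===== SOURCE A (Python) =====
-- def baseNeg2(N: int) -> str:
--     if N == 0:
--         digits = ['0']
--     else:
--         digits = []
--         while N != 0:
--             N, remainder = divmod(N, -2)
--             if remainder < 0:
--                 N, remainder = N + 1, remainder + 2
--             digits.append(str(remainder))
--     return ''.join(digits[::-1])
-- ===== SOURCE B (Python) =====
-- # Radix-4 table-driven conversion: each iteration consumes N mod 4 and emits
-- # TWO negabinary digits at once from a fixed table, then one lstrip pass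
-- # removes the single possible leading zero.
-- TABLE = {0: ('00', 0), 1: ('01', -1), 2: ('10', 2), 3: ('11', 1)}
--
-- def baseNeg2(N: int) -> str:
--     parts = []
--     while N != 0:
--         pair, adj = TABLE[N % 4]
--         parts.append(pair)
--         N = (N + adj) // 4
--     return ''.join(reversed(parts)).lstrip('0') or '0'
-- ===== Notes on version B (the rewrite author's own statement) =====
-- stated objective: alternative
-- what changed: Replaces the per-digit divmod(N,-2) loop with its negative-remainder correction branch by a radix-4 table lookup that emits two negabinary digits per iteration (halving the iteration count) followed by a single lstrip pass removing the one possible leading zero.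
import Mathlib
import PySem

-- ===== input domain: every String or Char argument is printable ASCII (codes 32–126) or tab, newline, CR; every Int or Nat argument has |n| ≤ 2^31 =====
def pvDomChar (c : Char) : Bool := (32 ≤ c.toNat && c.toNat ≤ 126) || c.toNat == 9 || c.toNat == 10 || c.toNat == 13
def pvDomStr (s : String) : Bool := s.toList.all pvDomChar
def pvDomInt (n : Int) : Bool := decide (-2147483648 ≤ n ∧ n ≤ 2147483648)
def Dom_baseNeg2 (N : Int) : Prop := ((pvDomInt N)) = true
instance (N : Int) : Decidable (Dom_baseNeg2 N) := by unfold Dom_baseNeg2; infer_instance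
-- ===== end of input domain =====

-- B replaces A's one-digit-per-iteration divmod(N,-2) loop (with its negative-remainder
-- correction branch) by a radix-4 table lookup emitting two negabinary digits per
-- iteration, followed by one lstrip('0') pass removing the single possible leading zero.

-- small arithmetic kit (kept free of natAbs-omega so the termination proofs stay small)
theorem pvHalf (m d : Int) (hd : d = 0 ∨ d = 1) : (2 * m + d) / 2 = m := by
  have h : 2 * m + d = d + m * 2 := by ring
  rw [h, Int.add_mul_ediv_right _ _ (by decide : (2:Int) ≠ 0)]
  rcases hd with h' | h' <;> simp [h']

theorem pvMod2 (m d : Int) (hd : d = 0 ∨ d = 1) : (2 * m + d) % 2 = d := by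
  have h : 2 * m + d = d + 2 * m := by ring
  rw [h, Int.add_mul_emod_self_left]
  rcases hd with h' | h' <;> simp [h']

theorem pvSplit2 (N : Int) : ∃ m d, N = 2 * m + d ∧ (d = 0 ∨ d = 1) :=
  ⟨N / 2, N % 2, (Int.mul_ediv_add_emod N 2).symm, Int.emod_two_eq_zero_or_one N⟩

theorem pvQuarter (m : Int) : 4 * m / 4 = m :=
  Int.mul_ediv_cancel_left m (by decide : (4:Int) ≠ 0)

theorem pvAbsLt (a b : Int) (h : (-b < a ∧ a < b) ∨ (b < a ∧ a < -b)) :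
    a.natAbs < b.natAbs := by
  rcases h with ⟨h1, h2⟩ | ⟨h1, h2⟩
  · rcases le_or_gt 0 a with ha | ha
    · exact Int.natAbs_lt_natAbs_of_nonneg_of_lt ha h2
    · rw [← Int.natAbs_neg a]
      exact Int.natAbs_lt_natAbs_of_nonneg_of_lt (by omega) (by omega)
  · rw [← Int.natAbs_neg b]
    rcases le_or_gt 0 a with ha | ha
    · exact Int.natAbs_lt_natAbs_of_nonneg_of_lt ha h2
    · rw [← Int.natAbs_neg a]
      exact Int.natAbs_lt_natAbs_of_nonneg_of_lt (by omega) (by omega)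

theorem pvMuALt (a b : Int)
    (h : a.natAbs < b.natAbs ∨ (a.natAbs = b.natAbs ∧ 0 ≤ a ∧ b < 0)) :
    2 * a.natAbs + (if a < 0 then 1 else 0) < 2 * b.natAbs + (if b < 0 then 1 else 0) := by
  rcases h with h | ⟨h1, h2, h3⟩
  · generalize a.natAbs = x at h ⊢
    generalize b.natAbs = y at h ⊢
    split_ifs <;> omega
  · rw [if_neg (not_lt.mpr h2), if_pos h3, h1]
    omega

theorem pvFdTwo (N : Int) : PySem.Int.floordiv N 2 = N / 2 :=
  PySem.Int.floordiv_eq_ediv_of_pos (by decide)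

theorem pvModNegTwo (N : Int) : PySem.Int.mod N (-2) = -((-N) % 2) := by
  have h := PySem.Int.mod_neg_neg (-N) 2
  have h2 : PySem.Int.mod (-N) 2 = (-N) % 2 := PySem.Int.mod_eq_emod_of_pos (by decide)
  simp only [neg_neg] at h
  rw [h2] at h
  exact h

theorem pvFdNegTwo (N : Int) : PySem.Int.floordiv N (-2) = (-N) / 2 := by
  have h := PySem.Int.floordiv_neg_neg (-N) 2
  have h2 : PySem.Int.floordiv (-N) 2 = (-N) / 2 := PySem.Int.floordiv_eq_ediv_of_pos (by decide)
  simp only [neg_neg] at h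
  rw [h2] at h
  exact h

-- step characterisations: A's corrected quotient is -(N // 2) (cited by decreasing_by and pvStepEq)
theorem pvQa (N : Int) (hlt : PySem.Int.mod N (-2) < 0) :
    PySem.Int.floordiv N (-2) + 1 = -(PySem.Int.floordiv N 2) := by
  rw [pvModNegTwo] at hlt
  rw [pvFdNegTwo, pvFdTwo]
  obtain ⟨m, d, hN, hd⟩ := pvSplit2 N
  subst hN
  rcases hd with h | h <;> subst h
  · have e : -(2 * m + 0) = 2 * (-m) + 0 := by ring
    rw [e, pvMod2 _ _ (Or.inl rfl)] at hlt
    omega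
  · have e : -(2 * m + 1) = 2 * (-(m + 1)) + 1 := by ring
    rw [e, pvHalf _ _ (Or.inr rfl), pvHalf _ _ (Or.inr rfl)]
    ring

theorem pvQb (N : Int) (hge : ¬ PySem.Int.mod N (-2) < 0) :
    PySem.Int.floordiv N (-2) = -(PySem.Int.floordiv N 2) := by
  rw [pvModNegTwo] at hge
  rw [pvFdNegTwo, pvFdTwo]
  obtain ⟨m, d, hN, hd⟩ := pvSplit2 N
  subst hN
  rcases hd with h | h <;> subst h
  · have e : -(2 * m + 0) = 2 * (-m) + 0 := by ring
    rw [e, pvHalf _ _ (Or.inl rfl), pvHalf _ _ (Or.inl rfl)]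
  · have e : -(2 * m + 1) = 2 * (-(m + 1)) + 1 := by ring
    rw [e, pvMod2 _ _ (Or.inr rfl)] at hge
    omega

-- the A-loop measure decreases (cited by decreasing_by of the A loop and of aD below)
theorem pvDecB (N : Int) (h : ¬N = 0) :
    2 * (-(PySem.Int.floordiv N 2)).natAbs + (if -(PySem.Int.floordiv N 2) < 0 then 1 else 0)
      < 2 * N.natAbs + (if N < 0 then 1 else 0) := by
  rw [pvFdTwo]
  obtain ⟨m, d, hN, hd⟩ := pvSplit2 N
  subst hN
  rw [pvHalf m d hd]
  apply pvMuALt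
  rcases hd with h' | h' <;> subst h'
  · have hm0 : m ≠ 0 := by omega
    left
    apply pvAbsLt
    rcases lt_or_gt_of_ne hm0 with h'' | h''
    · right; constructor <;> omega
    · left; constructor <;> omega
  · rcases lt_trichotomy m (-1) with h'' | h'' | h''
    · left; apply pvAbsLt; right; constructor <;> omega
    · subst h''; right; refine ⟨by decide, by decide, by decide⟩
    · left; apply pvAbsLt; left; constructor <;> omega

theorem pvDecA1 (N : Int) (h : ¬N = 0) (hlt : PySem.Int.mod N (-2) < 0) :
    2 * (PySem.Int.floordiv N (-2) + 1).natAbs + (if PySem.Int.floordiv N (-2) + 1 < 0 then 1 else 0)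
      < 2 * N.natAbs + (if N < 0 then 1 else 0) := by
  rw [pvQa N hlt]; exact pvDecB N h

theorem pvDecA2 (N : Int) (h : ¬N = 0) (hge : ¬ PySem.Int.mod N (-2) < 0) :
    2 * (PySem.Int.floordiv N (-2)).natAbs + (if PySem.Int.floordiv N (-2) < 0 then 1 else 0)
      < 2 * N.natAbs + (if N < 0 then 1 else 0) := by
  rw [pvQb N hge]; exact pvDecB N h

-- ===== PORT A =====
-- while N != 0: N, remainder = divmod(N, -2); if remainder < 0: correct; digits.append(str(remainder))
def baseNeg2Loop (N : Int) (digits : List String) : List String :=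
  if _h : N = 0 then digits
  else
    let q := PySem.Int.floordiv N (-2)
    let r := PySem.Int.mod N (-2)
    if r < 0 then baseNeg2Loop (q + 1) (digits ++ [PySem.Int.toStr (r + 2)])
    else baseNeg2Loop q (digits ++ [PySem.Int.toStr r])
termination_by 2 * N.natAbs + (if N < 0 then 1 else 0)
decreasing_by
  · simp only [r] at *
    exact pvDecA1 N _h (by assumption)
  · simp only [r] at *
    exact pvDecA2 N _h (by assumption)

def baseNeg2 (N : Int) : String :=
  let digits := if N = 0 then ["0"] else baseNeg2Loop N []
  PySem.Str.join "" ((PySem.List.slice? digits none none (-1)).getD [])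

-- ===== PORT B =====
-- TABLE = {0: ('00', 0), 1: ('01', -1), 2: ('10', 2), 3: ('11', 1)}; the lookup key
-- N % 4 is always 0..3, so the dict literal is ported as this total table function
def pvTable (r : Int) : String × Int :=
  if r = 0 then ("00", 0)
  else if r = 1 then ("01", -1)
  else if r = 2 then ("10", 2)
  else ("11", 1)

-- the B-loop measure decreases (cited by decreasing_by of the B loop and of bP below)
theorem pvSplit4 (N : Int) : ∃ k r, N = 4 * k + r ∧ N % 4 = r ∧ 0 ≤ r ∧ r < 4 :=
  ⟨N / 4, N % 4, (Int.mul_ediv_add_emod N 4).symm, rfl, Int.emod_nonneg N (by decide),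
    Int.emod_lt_of_pos N (by decide)⟩

theorem pvDecAlt (N : Int) (h : ¬N = 0) :
    (PySem.Int.floordiv (N + (pvTable (PySem.Int.mod N 4)).2) 4).natAbs < N.natAbs := by
  have hm : PySem.Int.mod N 4 = N % 4 := PySem.Int.mod_eq_emod_of_pos (by decide)
  obtain ⟨k, r, hk, hr, h0, h1⟩ := pvSplit4 N
  have h4 : r = 0 ∨ r = 1 ∨ r = 2 ∨ r = 3 := by clear hm hr hk h; omega
  rw [hm, hr]
  rcases h4 with h4 | h4 | h4 | h4 <;> subst h4 <;> subst hk <;> clear hm hr h0 h1 <;>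
    rw [PySem.Int.floordiv_eq_ediv_of_pos (by decide)] <;> apply pvAbsLt
  · rw [show (pvTable 0).2 = 0 from rfl]
    have e : 4 * k + 0 + 0 = 4 * k := by ring
    rw [e, pvQuarter]
    have hk0 : k ≠ 0 := by omega
    rcases lt_or_gt_of_ne hk0 with h'' | h''
    · right; constructor <;> omega
    · left; constructor <;> omega
  · rw [show (pvTable 1).2 = -1 from rfl]
    have e : 4 * k + 1 + -1 = 4 * k := by ring
    rw [e, pvQuarter]
    rcases lt_trichotomy k 0 with h'' | h'' | h''
    · right; constructor <;> omega
    · left; constructor <;> omega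
    · left; constructor <;> omega
  · rw [show (pvTable 2).2 = 2 from rfl]
    have e : 4 * k + 2 + 2 = 4 * (k + 1) := by ring
    rw [e, pvQuarter]
    rcases le_or_gt 0 k with h'' | h''
    · left; constructor <;> omega
    · right; constructor <;> omega
  · rw [show (pvTable 3).2 = 1 from rfl]
    have e : 4 * k + 3 + 1 = 4 * (k + 1) := by ring
    rw [e, pvQuarter]
    rcases le_or_gt 0 k with h'' | h''
    · left; constructor <;> omega
    · right; constructor <;> omega

-- while N != 0: pair, adj = TABLE[N % 4]; parts.append(pair); N = (N + adj) // 4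
def baseNeg2AltLoop (N : Int) (parts : List String) : List String :=
  if _h : N = 0 then parts
  else
    let t := pvTable (PySem.Int.mod N 4)
    baseNeg2AltLoop (PySem.Int.floordiv (N + t.2) 4) (parts ++ [t.1])
termination_by N.natAbs
decreasing_by exact pvDecAlt N _h

-- s.lstrip('0') ported by hand: drop leading '0' characters (exact for this one-char set)
def pvLstrip0 (s : String) : String := String.ofList (s.toList.dropWhile (· == '0'))

def baseNeg2_alt (N : Int) : String :=
  let parts := baseNeg2AltLoop N []
  let s := pvLstrip0 (PySem.Str.join "" parts.reverse)
  if s = "" then "0" else s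

-- ===== PRECONDITION & SPEC =====
def Spec_baseNeg2 (N : Int) (out : String) : Prop := out = baseNeg2_alt N
instance (N : Int) (out : String) : Decidable (Spec_baseNeg2 N out) := by unfold Spec_baseNeg2; infer_instance

-- ===== CLAIM =====
def Claim_equal_baseNeg2 : Prop := ∀ (N : Int), Dom_baseNeg2 N → Spec_baseNeg2 N (baseNeg2 N)

-- ===== LEMMAS AND PROOFS =====

theorem pvModTwo (N : Int) : PySem.Int.mod N 2 = N % 2 :=
  PySem.Int.mod_eq_emod_of_pos (by omega)

theorem pvJoinNil : PySem.Str.join "" ([] : List String) = "" := by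
  simp [PySem.Str.join, PySem.Chars.join_nil]

theorem pvJoinCons (s : String) (l : List String) :
    PySem.Str.join "" (s :: l) = s ++ PySem.Str.join "" l := by
  cases l with
  | nil =>
      apply String.ext
      simp [PySem.Str.join, PySem.Chars.join_singleton, PySem.Chars.join_nil]
  | cons t rest =>
      apply String.ext
      simp [PySem.Str.join, PySem.Chars.join_cons_cons]

theorem pvJoinAppend (l1 l2 : List String) :
    PySem.Str.join "" (l1 ++ l2) = PySem.Str.join "" l1 ++ PySem.Str.join "" l2 := by
  induction l1 with
  | nil => simp [pvJoinNil]
  | cons s rest ih => simp only [List.cons_append, pvJoinCons, ih, String.append_assoc]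

-- A's corrected divmod step equals the (-(N >> 1), N & 1) step
theorem pvStepEq (N : Int) :
    (if PySem.Int.mod N (-2) < 0 then
        (PySem.Int.floordiv N (-2) + 1, PySem.Int.mod N (-2) + 2)
      else (PySem.Int.floordiv N (-2), PySem.Int.mod N (-2)))
      = (-(PySem.Int.floordiv N 2), PySem.Int.mod N 2) := by
  have h1 := pvModNegTwo N; have h2 := pvModTwo N
  split_ifs with h
  · exact Prod.ext (pvQa N h) (by omega)
  · exact Prod.ext (pvQb N h) (by omega)

-- proof-only accumulator-free views of the two loops
def aD (N : Int) : List String :=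
  if _h : N = 0 then []
  else PySem.Int.toStr (PySem.Int.mod N 2) :: aD (-(PySem.Int.floordiv N 2))
termination_by 2 * N.natAbs + (if N < 0 then 1 else 0)
decreasing_by exact pvDecB N _h

def bP (N : Int) : List String :=
  if _h : N = 0 then []
  else (pvTable (PySem.Int.mod N 4)).1
    :: bP (PySem.Int.floordiv (N + (pvTable (PySem.Int.mod N 4)).2) 4)
termination_by N.natAbs
decreasing_by exact pvDecAlt N _h

theorem aLoop_eq (N : Int) (digits : List String) :
    baseNeg2Loop N digits = digits ++ aD N := by
  induction N, digits using baseNeg2Loop.induct with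
  | case1 digits =>
      rw [baseNeg2Loop, aD]; simp
  | case2 N digits hN q r hlt ih =>
      simp only [q, r] at hlt ih ⊢
      have hs := pvStepEq N
      rw [if_pos hlt] at hs
      have h1 : PySem.Int.floordiv N (-2) + 1 = -(PySem.Int.floordiv N 2) :=
        congrArg Prod.fst hs
      have h2 : PySem.Int.toStr (PySem.Int.mod N (-2) + 2) = PySem.Int.toStr (PySem.Int.mod N 2) :=
        congrArg (fun p => PySem.Int.toStr p.2) hs
      rw [baseNeg2Loop]
      simp only [dif_neg hN, if_pos hlt]
      rw [ih]
      conv_rhs => rw [aD]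
      simp only [dif_neg hN, ← h1, ← h2, List.append_assoc, List.singleton_append]
  | case3 N digits hN q r hge ih =>
      simp only [q, r] at hge ih ⊢
      have hs := pvStepEq N
      rw [if_neg hge] at hs
      have h1 : PySem.Int.floordiv N (-2) = -(PySem.Int.floordiv N 2) :=
        congrArg Prod.fst hs
      have h2 : PySem.Int.toStr (PySem.Int.mod N (-2)) = PySem.Int.toStr (PySem.Int.mod N 2) :=
        congrArg (fun p => PySem.Int.toStr p.2) hs
      rw [baseNeg2Loop]
      simp only [dif_neg hN, if_neg hge]
      rw [ih]
      conv_rhs => rw [aD]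
      simp only [dif_neg hN, ← h1, ← h2, List.append_assoc, List.singleton_append]

theorem bLoop_eq (N : Int) (parts : List String) :
    baseNeg2AltLoop N parts = parts ++ bP N := by
  induction N, parts using baseNeg2AltLoop.induct with
  | case1 parts => rw [baseNeg2AltLoop, bP]; simp
  | case2 N parts hN t ih =>
      simp only [t] at ih ⊢
      rw [baseNeg2AltLoop]
      simp only [dif_neg hN]
      rw [ih]
      conv_rhs => rw [bP]
      simp only [dif_neg hN, List.append_assoc, List.singleton_append]

-- the radix-4 table step performs exactly two of A's steps
theorem pvCore (N : Int) :
    (pvTable (PySem.Int.mod N 4)).1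
        = PySem.Int.toStr (PySem.Int.mod (-(PySem.Int.floordiv N 2)) 2)
          ++ PySem.Int.toStr (PySem.Int.mod N 2)
      ∧ PySem.Int.floordiv (N + (pvTable (PySem.Int.mod N 4)).2) 4
        = -(PySem.Int.floordiv (-(PySem.Int.floordiv N 2)) 2) := by
  have hm4 : PySem.Int.mod N 4 = N % 4 := PySem.Int.mod_eq_emod_of_pos (by omega)
  have hm2 := pvModTwo N
  have hm2' := pvModTwo (-(PySem.Int.floordiv N 2))
  have hf2 := pvFdTwo N
  have hf2' := pvFdTwo (-(PySem.Int.floordiv N 2))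
  rw [hm4, hm2, hm2', hf2', hf2]
  have h4 : N % 4 = 0 ∨ N % 4 = 1 ∨ N % 4 = 2 ∨ N % 4 = 3 := by omega
  rcases h4 with h4 | h4 | h4 | h4 <;> rw [h4] <;> simp only [pvTable] <;> norm_num <;>
      refine ⟨?_, by omega⟩
  · have e1 : N / 2 % 2 = 0 := by omega
    have e0 : N % 2 = 0 := by omega
    rw [e1, e0]; decide
  · have e1 : N / 2 % 2 = 0 := by omega
    have e0 : N % 2 = 1 := by omega
    rw [e1, e0]; decide
  · have e1 : N / 2 % 2 = 1 := by omega
    have e0 : N % 2 = 0 := by omega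
    rw [e1, e0]; decide
  · have e1 : N / 2 % 2 = 1 := by omega
    have e0 : N % 2 = 1 := by omega
    rw [e1, e0]; decide

theorem pvN1_zero_iff (N : Int) (hN : N ≠ 0) : -(PySem.Int.floordiv N 2) = 0 ↔ N = 1 := by
  rw [pvFdTwo]; omega

theorem aD_zero : aD 0 = [] := by rw [aD]; simp

theorem bP_zero : bP 0 = [] := by rw [bP]; simp

theorem aD_one : aD 1 = ["1"] := by
  rw [aD]
  have e : -(PySem.Int.floordiv 1 2) = 0 := by decide
  simp only [e, aD_zero]
  decide

theorem bP_one : bP 1 = ["01"] := by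
  rw [bP]
  have e : PySem.Int.floordiv (1 + (pvTable (PySem.Int.mod 1 4)).2) 4 = 0 := by decide
  simp only [e, bP_zero]
  decide

-- A's digit list ends in "1" (the most significant digit is 1)
theorem aD_last (N : Int) (hN : N ≠ 0) : ∃ l, aD N = l ++ ["1"] := by
  induction N using aD.induct with
  | case1 => exact absurd rfl hN
  | case2 N hNz ih =>
      by_cases h1 : -(PySem.Int.floordiv N 2) = 0
      · have : N = 1 := (pvN1_zero_iff N hNz).mp h1
        subst this
        exact ⟨[], by rw [aD_one]; rfl⟩
      · obtain ⟨l, hl⟩ := ih h1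
        rw [aD]; simp only [dif_neg hNz]
        exact ⟨PySem.Int.toStr (PySem.Int.mod N 2) :: l, by rw [hl, List.cons_append]⟩

-- the joined, reversed strings: B's equals A's, possibly with one leading '0'
theorem pvMain (N : Int) (hN : N ≠ 0) :
    PySem.Str.join "" (bP N).reverse = PySem.Str.join "" (aD N).reverse
      ∨ PySem.Str.join "" (bP N).reverse = "0" ++ PySem.Str.join "" (aD N).reverse := by
  induction N using bP.induct with
  | case1 => exact absurd rfl hN
  | case2 N hNz ih =>
      obtain ⟨hpair, hnext⟩ := pvCore N
      by_cases hz : PySem.Int.floordiv (N + (pvTable (PySem.Int.mod N 4)).2) 4 = 0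
      · by_cases h1 : -(PySem.Int.floordiv N 2) = 0
        · -- N = 1: A emits one digit, B's pair has a leading zero
          have hNe : N = 1 := (pvN1_zero_iff N hNz).mp h1
          subst hNe
          right
          rw [bP_one, aD_one]
          decide
        · -- A emits exactly two digits here and stops
          have hz2 : -(PySem.Int.floordiv (-(PySem.Int.floordiv N 2)) 2) = 0 := by
            rw [← hnext]; exact hz
          left
          rw [bP]; simp only [dif_neg hNz]
          rw [hz, bP_zero]
          rw [aD]; simp only [dif_neg hNz]
          rw [aD]; simp only [dif_neg h1]
          rw [hz2, aD_zero]
          simp only [List.reverse_cons, List.reverse_nil, List.nil_append,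
            List.singleton_append, pvJoinCons, pvJoinNil]
          rw [hpair]
          simp
      · -- loop B continues: A emits two digits and reaches the same next state
        have h1 : -(PySem.Int.floordiv N 2) ≠ 0 := by
          intro h1
          have hNe : N = 1 := (pvN1_zero_iff N hNz).mp h1
          subst hNe
          exact hz (by decide)
        have hJb : PySem.Str.join "" (bP N).reverse
            = PySem.Str.join "" (bP (PySem.Int.floordiv (N + (pvTable (PySem.Int.mod N 4)).2) 4)).reverse
              ++ (pvTable (PySem.Int.mod N 4)).1 := by
          conv_lhs => rw [bP]
          simp only [dif_neg hNz]
          simp only [List.reverse_cons, pvJoinAppend, pvJoinCons, pvJoinNil]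
          rw [String.append_empty]
        have hJa : PySem.Str.join "" (aD N).reverse
            = PySem.Str.join "" (aD (PySem.Int.floordiv (N + (pvTable (PySem.Int.mod N 4)).2) 4)).reverse
              ++ (pvTable (PySem.Int.mod N 4)).1 := by
          conv_lhs => rw [aD]
          simp only [dif_neg hNz]
          conv_lhs => rw [aD]
          simp only [dif_neg h1]
          rw [hnext]
          simp only [List.reverse_cons, List.append_assoc, List.singleton_append]
          rw [hpair]
          simp [pvJoinAppend, pvJoinCons, pvJoinNil]
        rcases ih hz with h | h
        · left; rw [hJb, hJa, h]
        · right; rw [hJb, hJa, h, String.append_assoc]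

theorem pvLstrip0_one (s : String) (cs : List Char) (h : s.toList = '1' :: cs) :
    pvLstrip0 s = s := by
  unfold pvLstrip0
  rw [h, List.dropWhile_cons]
  norm_num
  rw [← h]
  simp

theorem pvLstrip0_zero_one (s : String) (cs : List Char) (h : s.toList = '1' :: cs) :
    pvLstrip0 ("0" ++ s) = s := by
  unfold pvLstrip0
  have h0 : ("0" ++ s).toList = '0' :: s.toList := by simp
  rw [h0, List.dropWhile_cons]
  norm_num
  rw [h, List.dropWhile_cons]
  norm_num
  rw [← h]
  simp

-- the joined reversed A-digits start with '1'
theorem pvJa_head (N : Int) (hN : N ≠ 0) :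
    ∃ cs, (PySem.Str.join "" (aD N).reverse).toList = '1' :: cs := by
  obtain ⟨l, hl⟩ := aD_last N hN
  rw [hl]
  simp only [List.reverse_append, List.reverse_cons, List.reverse_nil, List.nil_append,
    List.singleton_append, pvJoinCons]
  exact ⟨(PySem.Str.join "" l.reverse).toList, by simp⟩

-- ===== VERDICT (by name: the statement is the Claim_ definition above) =====
theorem baseNeg2_spec : Claim_equal_baseNeg2 := by
  intro N _
  unfold Spec_baseNeg2 baseNeg2 baseNeg2_alt
  by_cases h : N = 0
  · subst h
    have eB : baseNeg2AltLoop 0 [] = [] := by rw [baseNeg2AltLoop]; simp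
    simp only [eB]
    decide
  · simp only [h, if_false, PySem.List.slice?_none_none_neg_one, Option.getD_some]
    rw [aLoop_eq, bLoop_eq]
    simp only [List.nil_append]
    obtain ⟨cs, hcs⟩ := pvJa_head N h
    have hne : PySem.Str.join "" (aD N).reverse ≠ "" := by
      intro he; rw [he] at hcs; simp at hcs
    rcases pvMain N h with hm | hm
    · rw [hm, pvLstrip0_one _ _ hcs]
      simp only [if_neg hne]
    · rw [hm, pvLstrip0_zero_one _ _ hcs]
      simp only [if_neg hne]
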